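-- pv_equiv track=rewrite | github.com/yoongdoo0819/Algorithm | programmers7.py | solution
-- ===== SOURCE A (Python) =====
-- def correct_str(s):
--     stack = []
--     for ch in s:
--         if ch == '(':
--             stack.append(ch)
--         elif ch == ')':
--             if len(stack) != 0 and stack[-1] == '(':
--                 stack.pop(-1)
--             else:
--                 return False
--     if len(stack) == 0:
--         return True
--     else:
--         return False
--
-- def balanced_str(s):
--     cnt = 0
--     for idx, ch in enumerate(s):
--         if ch == '(':
--             cnt += 1
--         elif ch == ')':
--             cnt -= 1
--         if cnt == 0:
--             return s[:idx+1], s[idx+1:]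
--
-- def reverse_str(s):
--     temp_s = ''
--     for ch in s:
--         if ch == '(':
--             temp_s += ')'
--         else:
--             temp_s += '('
--
--     return temp_s
--
-- def solution(p):
--     u = ''
--
--     if len(p) == 0:
--         return u
--
--     u, v = balanced_str(p)
--     if correct_str(u) == True:
--         u += solution(v)
--     else:
--         empty_str = '('
--         empty_str += solution(v)
--         empty_str += ')'
--         u = u[1:-1]
--         u = empty_str + reverse_str(u)
--
--     return u
-- ===== SOURCE B (Python) =====
-- def solution(p):
--     out = []
--     tails = []
--     s = p
--     while s:
--         cnt = 0
--         neg = False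
--         i = 0
--         for i, ch in enumerate(s):
--             if ch == '(':
--                 cnt += 1
--             elif ch == ')':
--                 cnt -= 1
--                 if cnt < 0:
--                     neg = True
--             if cnt == 0:
--                 break
--         u, s = s[:i + 1], s[i + 1:]
--         if not neg:
--             out.append(u)
--         else:
--             out.append('(')
--             tails.append(')' + ''.join(')' if c == '(' else '(' for c in u[1:-1]))
--     return ''.join(out) + ''.join(reversed(tails))
-- ===== Notes on version B (the rewrite author's own statement) =====
-- stated objective: faster
-- what changed: Replaces A's recursion (which re-concatenates each suffix's result string and scans every balanced unit twice, once to split and once with a stack to check correctness) with one iterative pass that splits each unit while simultaneously tracking whether the running count goes negative, collects output pieces and pending flipped tails in lists, and joins everything once at the end.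
-- outside the precondition, e.g. on solution('('): A raises TypeError, B returns '('; on solution(')'): A raises TypeError, B returns '()'
import Mathlib
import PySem

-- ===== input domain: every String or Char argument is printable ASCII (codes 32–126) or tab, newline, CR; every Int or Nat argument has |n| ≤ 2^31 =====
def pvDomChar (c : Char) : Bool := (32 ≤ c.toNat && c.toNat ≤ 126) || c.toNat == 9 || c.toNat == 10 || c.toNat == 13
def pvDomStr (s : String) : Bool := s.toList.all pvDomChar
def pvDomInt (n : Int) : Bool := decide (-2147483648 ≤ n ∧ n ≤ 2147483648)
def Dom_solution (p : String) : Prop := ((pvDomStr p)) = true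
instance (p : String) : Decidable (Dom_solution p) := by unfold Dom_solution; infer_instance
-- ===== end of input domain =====

-- B replaces A's recursion (which rebuilds and re-concatenates suffix results, and re-scans
-- each unit twice) with one iterative pass: each balanced unit is split and checked for a
-- negative running count in a single scan, pieces are collected in lists and joined once.

-- ===== PORT A =====
-- correct_str's stack (it only ever holds '(') with its top at the head
def correctGo : List Char → List Char → Bool
  | [], stack => stack.isEmpty
  | ch :: rest, stack =>
    if ch = '(' then correctGo rest ('(' :: stack)
    else if ch = ')' then
      match stack with
      | '(' :: t => correctGo rest t
      | _ => false
    else correctGo rest stack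

def correct_str (s : List Char) : Bool := correctGo s []

-- balanced_str's scan: returns (s[:idx+1], s[idx+1:]) at the first index where cnt = 0,
-- none when the loop falls through (Python returns None there; solution then raises)
def balanced_str : List Char → Int → Option (List Char × List Char)
  | [], _ => none
  | ch :: rest, cnt =>
    let cnt' := if ch = '(' then cnt + 1 else if ch = ')' then cnt - 1 else cnt
    if cnt' = 0 then some ([ch], rest)
    else
      match balanced_str rest cnt' with
      | some (u, v) => some (ch :: u, v)
      | none => none

def reverse_str : List Char → List Char
  | [] => []
  | ch :: rest => (if ch = '(' then [')'] else ['(']) ++ reverse_str rest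

-- fuel = input length suffices: each recursive call drops a nonempty prefix
def solutionGo : Nat → List Char → List Char
  | 0, _ => []
  | n + 1, p =>
    if p = [] then []
    else
      match balanced_str p 0 with
      | none => []   -- Python raises TypeError here (unpacking None); excluded by Pre_
      | some (u, v) =>
        if correct_str u = true then u ++ solutionGo n v
        else (['('] ++ solutionGo n v ++ [')']) ++
          reverse_str (PySem.List.slice u (some 1) (some (-1)))

def solution (p : String) : String := String.mk (solutionGo p.toList.length p.toList)

-- ===== PORT B =====
-- B's inner for-loop: split index of the unit and whether cnt ever went negative in it
def scanB : List Char → Int → Bool → Nat × Bool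
  | [], _, neg => (0, neg)
  | ch :: rest, cnt, neg =>
    let cnt' := if ch = '(' then cnt + 1 else if ch = ')' then cnt - 1 else cnt
    let neg' := neg || (decide (ch = ')') && decide (cnt' < 0))
    if cnt' = 0 then (1, neg')
    else
      let r := scanB rest cnt' neg'
      (r.1 + 1, r.2)

def flipB : List Char → List Char := List.map (fun c => if c = '(' then ')' else '(')

def altGoF : Nat → List Char → List Char → List (List Char) → List Char
  | 0, _, out, tails => out ++ tails.flatten
  | n + 1, s, out, tails =>
    match s with
    | [] => out ++ tails.flatten
    | _ :: _ =>
      let r := scanB s 0 false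
      let u := s.take r.1
      if r.2 = false then altGoF n (s.drop r.1) (out ++ u) tails
      else altGoF n (s.drop r.1) (out ++ ['('])
        ((')' :: flipB (PySem.List.slice u (some 1) (some (-1)))) :: tails)

def solution_alt (p : String) : String := String.mk (altGoF p.toList.length p.toList [] [])

-- ===== PRECONDITION & SPEC =====
-- A raises TypeError (balanced_str returns None) exactly when p has unequal numbers of
-- '(' and ')'; Pre_ admits exactly the inputs on which A returns.
def Pre_solution (p : String) : Prop := p.toList.count '(' = p.toList.count ')'
instance (p : String) : Decidable (Pre_solution p) := by unfold Pre_solution; infer_instance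
def pvWitness_solution : String := "()"

def Spec_solution (p : String) (out : String) : Prop := out = solution_alt p
instance (p : String) (out : String) : Decidable (Spec_solution p out) := by unfold Spec_solution; infer_instance

-- ===== CLAIM (what is proved, stated in full; the proofs are below) =====
def Claim_equal_solution : Prop := ∀ (p : String), Dom_solution p → Pre_solution p → Spec_solution p (solution p)

-- ===== LEMMAS AND PROOFS =====

-- signed paren balance of a list
def balInt : List Char → Int
  | [] => 0
  | ch :: r => (if ch = '(' then 1 else if ch = ')' then -1 else 0) + balInt r

-- whether the running count starting from c ever goes negative at a ')'
def hasNeg : List Char → Int → Bool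
  | [], _ => false
  | ch :: r, c =>
    let c' := if ch = '(' then c + 1 else if ch = ')' then c - 1 else c
    (decide (ch = ')') && decide (c' < 0)) || hasNeg r c'

theorem balInt_append (a b : List Char) : balInt (a ++ b) = balInt a + balInt b := by
  induction a with
  | nil => simp [balInt]
  | cons ch r ih => simp [balInt, ih]; ring

theorem balInt_eq_counts (l : List Char) :
    balInt l = (l.count '(' : Int) - (l.count ')' : Int) := by
  induction l with
  | nil => simp [balInt]
  | cons ch r ih =>
    by_cases h1 : ch = '(' <;> by_cases h2 : ch = ')' <;>
      simp [balInt, ih, List.count_cons, h1, h2] <;> omega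

theorem bal_shape {s : List Char} {c : Int} {u v : List Char}
    (h : balanced_str s c = some (u, v)) : s = u ++ v ∧ c + balInt u = 0 ∧ u ≠ [] := by
  induction s generalizing c u v with
  | nil => simp [balanced_str] at h
  | cons ch rest ih =>
    simp only [balanced_str] at h
    set c' := if ch = '(' then c + 1 else if ch = ')' then c - 1 else c with hc'
    have hc'' : c' = c + (if ch = '(' then 1 else if ch = ')' then -1 else 0) := by
      rw [hc']; split <;> try split
      all_goals omega
    by_cases h0 : c' = 0
    · simp [h0] at h
      obtain ⟨hu, hv⟩ := h
      subst hu; subst hv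
      refine ⟨rfl, ?_, by simp⟩
      simp [balInt]
      omega
    · simp [h0] at h
      cases hb : balanced_str rest c' with
      | none => simp [hb] at h
      | some p =>
        obtain ⟨u', v'⟩ := p
        simp [hb] at h
        obtain ⟨hu, hv⟩ := h
        subst hv
        obtain ⟨hs, hbal, _⟩ := ih hb
        refine ⟨by rw [← hu]; simp [hs], ?_, by rw [← hu]; simp⟩
        rw [← hu]
        simp [balInt] at hbal ⊢
        omega

theorem bal_exists {s : List Char} {c : Int} (hne : s ≠ []) (hb : c + balInt s = 0) :
    ∃ u v, balanced_str s c = some (u, v) := by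
  induction s generalizing c with
  | nil => exact absurd rfl hne
  | cons ch rest ih =>
    simp only [balanced_str]
    set c' := if ch = '(' then c + 1 else if ch = ')' then c - 1 else c with hc'
    have hc'' : c' = c + (if ch = '(' then 1 else if ch = ')' then -1 else 0) := by
      rw [hc']; split <;> try split
      all_goals omega
    by_cases h0 : c' = 0
    · exact ⟨[ch], rest, by simp [h0]⟩
    · have hrest : c' + balInt rest = 0 := by
        simp [balInt] at hb ⊢; omega
      have hne' : rest ≠ [] := by
        rintro rfl
        simp [balInt] at hrest
        exact h0 hrest
      obtain ⟨u, v, huv⟩ := ih hne' hrest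
      exact ⟨ch :: u, v, by simp [h0, huv]⟩

theorem scan_eq {s : List Char} {c : Int} {u v : List Char}
    (h : balanced_str s c = some (u, v)) (neg : Bool) :
    scanB s c neg = (u.length, neg || hasNeg u c) := by
  induction s generalizing c u v neg with
  | nil => simp [balanced_str] at h
  | cons ch rest ih =>
    simp only [balanced_str] at h
    simp only [scanB]
    set c' := if ch = '(' then c + 1 else if ch = ')' then c - 1 else c with hc'
    by_cases h0 : c' = 0
    · simp [h0] at h
      obtain ⟨hu, hv⟩ := h
      subst hu
      simp [h0, hasNeg, ← hc']
    · simp [h0] at h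
      cases hb : balanced_str rest c' with
      | none => simp [hb] at h
      | some p =>
        obtain ⟨u', v'⟩ := p
        simp [hb] at h
        obtain ⟨hu, hv⟩ := h
        subst hu
        simp [h0, ih hb, hasNeg, ← hc', Bool.or_assoc]

theorem correct_char (u : List Char) (m : Nat) :
    correctGo u (List.replicate m '(') =
      (!hasNeg u (m : Int) && decide ((m : Int) + balInt u = 0)) := by
  induction u generalizing m with
  | nil =>
    cases m <;> simp [correctGo, hasNeg, balInt, List.replicate] <;> omega
  | cons ch rest ih =>
    by_cases h1 : ch = '('
    · subst h1
      have : ('(' :: List.replicate m '(') = List.replicate (m + 1) '(' := by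
        simp [List.replicate_succ]
      simp only [correctGo, if_pos rfl, this, ih (m + 1), hasNeg, balInt]
      have hpq : ((m : Int) + 1 + balInt rest = 0) ↔ ((m : Int) + (1 + balInt rest) = 0) := by omega
      simp [hpq]
    · by_cases h2 : ch = ')'
      · subst h2
        cases m with
        | zero => simp [correctGo, hasNeg, h1]
        | succ k =>
          have : List.replicate (k + 1) '(' = '(' :: List.replicate k '(' := by
            simp [List.replicate_succ]
          simp only [correctGo, if_neg h1, if_pos rfl, this, ih k, hasNeg, balInt]
          have hc : ((k + 1 : Nat) : Int) - 1 = (k : Int) := by push_cast; ring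
          have hpq : ((k : Int) + balInt rest = 0) ↔ (((k + 1 : Nat) : Int) + (-1 + balInt rest) = 0) := by push_cast; omega
          have hng : ¬ (((k + 1 : Nat) : Int) - 1 < 0) := by push_cast; omega
          have hk : ¬ ((k : Int) < 0) := by omega
          simp [h1, hc, hpq, hng, hk]
      · simp only [correctGo, if_neg h1, if_neg h2, ih m, hasNeg, balInt]
        simp [h1, h2]

theorem correct_iff {u : List Char} (hb : balInt u = 0) :
    correct_str u = !hasNeg u 0 := by
  have := correct_char u 0
  simp [hb] at this
  simpa [correct_str] using this

theorem main_lemma : ∀ (n m : Nat) (s out : List Char) (tails : List (List Char)),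
    s.length ≤ n → s.length ≤ m → balInt s = 0 →
    altGoF n s out tails = out ++ solutionGo m s ++ tails.flatten := by
  intro n
  induction n with
  | zero =>
    intro m s out tails hn _ _
    have : s = [] := List.eq_nil_of_length_eq_zero (Nat.le_zero.mp hn)
    subst this
    cases m <;> simp [altGoF, solutionGo]
  | succ n ih =>
    intro m s out tails hn hm hbal
    cases hs : s with
    | nil => cases m <;> simp [altGoF, solutionGo]
    | cons ch rest =>
      subst hs
      have hne : ch :: rest ≠ [] := by simp
      obtain ⟨u, v, hb⟩ := bal_exists (c := 0) hne (by omega)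
      obtain ⟨hsplit, hbu, hune⟩ := bal_shape hb
      have hbu0 : balInt u = 0 := by omega
      have hbv0 : balInt v = 0 := by
        have := balInt_append u v
        rw [← hsplit] at this
        omega
      have hm1 : 1 ≤ m := le_trans (by simp) hm
      obtain ⟨m2, rfl⟩ : ∃ k, m = k + 1 := ⟨m - 1, by omega⟩
      have hscan := scan_eq hb false
      have hulen : u.length ≤ (ch :: rest).length := by
        rw [hsplit]; simp
      have htake : (ch :: rest).take u.length = u := by
        rw [hsplit]; exact List.take_left
      have hdrop : (ch :: rest).drop u.length = v := by
        rw [hsplit]; exact List.drop_left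
      have hvlen : v.length < (ch :: rest).length := by
        rw [hsplit]
        have : 0 < u.length := List.length_pos_iff.mpr hune
        simp; omega
      simp only [altGoF, solutionGo, if_neg hne, hb, hscan, Bool.false_or, htake, hdrop]
      rw [correct_iff hbu0]
      cases hng : hasNeg u 0 with
      | false =>
        simp only [Bool.not_false]
        simp only [if_true]
        rw [ih m2 v (out ++ u) tails (by omega) (by omega) hbv0]
        simp
      | true =>
        simp only [Bool.not_true, Bool.true_eq_false, Bool.false_eq_true, if_false]
        rw [ih m2 v (out ++ ['('])
          ((')' :: flipB (PySem.List.slice u (some 1) (some (-1)))) :: tails) (by omega) (by omega) hbv0]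
        have hflip : ∀ w : List Char, flipB w = reverse_str w := by
          intro w
          induction w with
          | nil => rfl
          | cons c r ihw => by_cases hc : c = '(' <;> simp [flipB, reverse_str, hc] at ihw ⊢ <;> exact ihw
        simp [hflip]

-- ===== VERDICT (by name: the statement is the Claim_ definition above) =====
theorem solution_spec : Claim_equal_solution := by
  intro p _ hpre
  unfold Spec_solution solution solution_alt
  rw [main_lemma p.toList.length p.toList.length p.toList [] [] le_rfl le_rfl
    (by rw [balInt_eq_counts]; unfold Pre_solution at hpre; omega)]
  simp
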